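-- pv_equiv track=rewrite | github.com/Tran-Chi-An-1104/Symbolic-and-Algebraic-Reasoning-in-Petri-Nets | src/PNML_Read.py | Transition_Input_Output
-- ===== SOURCE A (Python) =====
-- def Transition_Input_Output(places, transitions, arcs):
--     #pre = { "T1": [], "T2": [], "T3": [], ... }    -    Get input of arcs
--     pre = {}
--     for transition_id in transitions:
--         pre[transition_id] = []
--
--     #post = { "T1": [], "T2": [], "T3": [], ... }   -    Get output of arcs
--     post = {}
--     for transition_id in transitions:
--         post[transition_id] = []
--
--
--     for arc in arcs:
--         source = arc[0]
--         target = arc[1]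
--
--         #If arc is: place -> transition
--         if (source in places) and (target in transitions):
--             pre[target].append(source)
--         #If arc is: transition -> place
--         elif (source in transitions) and (target in places):
--             post[source].append(target)
--
--
--     return pre, post
-- ===== SOURCE B (Python) =====
-- def Transition_Input_Output(places, transitions, arcs):
--     pre = {t: [s for s, d in arcs if d == t and s in places] for t in transitions}
--     post = {t: [d for s, d in arcs if s == t and d in places] for t in transitions}
--     return pre, post
-- ===== Notes on version B (the rewrite author's own statement) =====
-- stated objective: idiomatic
-- what changed: Replaces A's single classifying pass over arcs appending into pre-initialised per-transition dict lists with two dict comprehensions that filter the arc list per transition; Pre_ excludes inputs where some arc has both endpoints in both places and transitions, a degenerate overlap on which A's exclusive elif arbitrarily classifies the arc as input only.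
-- outside the precondition, e.g. on Transition_Input_Output([''], [''], [('', '')]): A returns ({'': ['']}, {'': []}), B returns ({'': ['']}, {'': ['']})
import Mathlib
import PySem

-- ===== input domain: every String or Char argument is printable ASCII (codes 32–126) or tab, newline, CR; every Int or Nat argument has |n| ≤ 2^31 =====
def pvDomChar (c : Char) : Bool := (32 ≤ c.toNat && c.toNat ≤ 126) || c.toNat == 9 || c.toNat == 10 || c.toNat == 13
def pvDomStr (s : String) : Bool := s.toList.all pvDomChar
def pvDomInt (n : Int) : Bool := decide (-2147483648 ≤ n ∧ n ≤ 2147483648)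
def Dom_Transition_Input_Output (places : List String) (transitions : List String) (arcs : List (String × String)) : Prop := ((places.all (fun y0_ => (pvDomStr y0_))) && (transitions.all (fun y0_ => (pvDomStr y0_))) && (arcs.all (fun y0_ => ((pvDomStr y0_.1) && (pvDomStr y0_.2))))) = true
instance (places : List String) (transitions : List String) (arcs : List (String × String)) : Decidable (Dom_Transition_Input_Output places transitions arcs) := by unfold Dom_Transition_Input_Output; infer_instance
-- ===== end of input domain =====

-- B replaces A's single classifying pass over the arcs with per-transition dict
-- comprehensions that filter the arc list directly (idiomatic decomposition, same results on Pre_).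


-- ===== PORT A =====
-- Literal port: build pre/post dicts with [] for every transition, then one pass over
-- arcs with the exclusive if/elif.  'pre[target].append(source)' is modify with default []
-- (exact: the guard 'target in transitions' ensures the key is present, so no KeyError).
def Transition_Input_Output (places : List String) (transitions : List String) (arcs : List (String × String)) : (List (String × List String)) × (List (String × List String)) :=
  let pre0 : PySem.Dict String (List String) :=
    transitions.foldl (fun d t => d.insert t []) PySem.Dict.empty
  let post0 : PySem.Dict String (List String) :=
    transitions.foldl (fun d t => d.insert t []) PySem.Dict.empty
  let res :=
    arcs.foldl
      (fun (pp : PySem.Dict String (List String) × PySem.Dict String (List String)) arc =>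
        let source := arc.1
        let target := arc.2
        if source ∈ places ∧ target ∈ transitions then
          (pp.1.modify target [] (· ++ [source]), pp.2)
        else if source ∈ transitions ∧ target ∈ places then
          (pp.1, pp.2.modify source [] (· ++ [target]))
        else pp)
      (pre0, post0)
  (res.1.items, res.2.items)

-- ===== PORT B =====
-- B-side helpers: the two comprehension bodies.
def pvPreList (places : List String) (arcs : List (String × String)) (t : String) : List String :=
  (arcs.filter (fun a => a.2 == t && decide (a.1 ∈ places))).map (·.1)

def pvPostList (places : List String) (arcs : List (String × String)) (t : String) : List String :=
  (arcs.filter (fun a => a.1 == t && decide (a.2 ∈ places))).map (·.2)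

-- Each dict comprehension is a fold inserting the comprehension value per transition.
def Transition_Input_Output_alt (places : List String) (transitions : List String) (arcs : List (String × String)) : (List (String × List String)) × (List (String × List String)) :=
  let pre : PySem.Dict String (List String) :=
    transitions.foldl (fun d t => d.insert t (pvPreList places arcs t)) PySem.Dict.empty
  let post : PySem.Dict String (List String) :=
    transitions.foldl (fun d t => d.insert t (pvPostList places arcs t)) PySem.Dict.empty
  (pre.items, post.items)

-- ===== PRECONDITION & SPEC =====
-- Pre_ excludes inputs where some arc has both endpoints in both places and transitions:
-- on that degenerate overlap A's exclusive elif arbitrarily records the arc as input only,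
-- while B symmetrically records it as both input and output; either reading is defensible.
def Pre_Transition_Input_Output (places : List String) (transitions : List String) (arcs : List (String × String)) : Prop :=
  ∀ a ∈ arcs, ¬ (a.1 ∈ places ∧ a.2 ∈ transitions ∧ a.1 ∈ transitions ∧ a.2 ∈ places)
instance (places : List String) (transitions : List String) (arcs : List (String × String)) : Decidable (Pre_Transition_Input_Output places transitions arcs) := by unfold Pre_Transition_Input_Output; infer_instance

def pvWitness_Transition_Input_Output : List String × List String × (List (String × String)) :=
  (["p1", "p2"], ["t1"], [("p1", "t1"), ("t1", "p2")])

def Spec_Transition_Input_Output (places : List String) (transitions : List String) (arcs : List (String × String)) (out : (List (String × List String)) × (List (String × List String))) : Prop := out = Transition_Input_Output_alt places transitions arcs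
instance (places : List String) (transitions : List String) (arcs : List (String × String)) (out : (List (String × List String)) × (List (String × List String))) : Decidable (Spec_Transition_Input_Output places transitions arcs out) := by unfold Spec_Transition_Input_Output; infer_instance

-- ===== CLAIM (what is proved, stated in full; the proofs are below) =====
def Claim_equal_Transition_Input_Output : Prop := ∀ (places : List String) (transitions : List String) (arcs : List (String × String)), Dom_Transition_Input_Output places transitions arcs → Pre_Transition_Input_Output places transitions arcs → Spec_Transition_Input_Output places transitions arcs (Transition_Input_Output places transitions arcs)

-- ===== LEMMAS AND PROOFS =====

-- A fold that inserts a value depending only on the key yields the dedup-map items list.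
theorem getD_foldl_insert_fun (l : List String) (v : String → List String) (k : String) (d : PySem.Dict String (List String)) :
    (l.foldl (fun d t => d.insert t (v t)) d).getD k []
      = if k ∈ l then v k else d.getD k [] := by
  induction l generalizing d with
  | nil => simp
  | cons t ts ih =>
    simp only [List.foldl_cons, ih, PySem.Dict.getD_insert, List.mem_cons]
    by_cases hk : k ∈ ts <;> by_cases he : k = t <;> simp [hk, he]

theorem items_foldl_insert_fun (l : List String) (v : String → List String) :
    (l.foldl (fun d t => d.insert t (v t)) PySem.Dict.empty).items
      = (PySem.Set.ofList l).map (fun t => (t, v t)) := by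
  have hnd : (l.foldl (fun d t => d.insert t (v t)) PySem.Dict.empty).keys.Nodup :=
    PySem.Dict.nodup_keys_foldl_insert l (fun _ t => v t) _ (by simp)
  rw [PySem.Dict.items_eq_map_keys _ hnd [],
      PySem.Dict.keys_foldl_insert l (fun _ t => v t), PySem.Dict.keys_empty,
      PySem.Set.update_nil_left]
  refine List.map_congr_left (fun t ht => ?_)
  rw [getD_foldl_insert_fun]
  simp [(PySem.Set.mem_ofList l t).mp ht]

-- Splitting A's pair fold into two independent folds.
theorem pair_fold_split (places transitions : List String) (arcs : List (String × String))
    (d1 d2 : PySem.Dict String (List String)) :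
    arcs.foldl
      (fun (pp : PySem.Dict String (List String) × PySem.Dict String (List String)) arc =>
        if arc.1 ∈ places ∧ arc.2 ∈ transitions then
          (pp.1.modify arc.2 [] (· ++ [arc.1]), pp.2)
        else if arc.1 ∈ transitions ∧ arc.2 ∈ places then
          (pp.1, pp.2.modify arc.1 [] (· ++ [arc.2]))
        else pp)
      (d1, d2)
    = (arcs.foldl (fun d a => if a.1 ∈ places ∧ a.2 ∈ transitions then d.modify a.2 [] (· ++ [a.1]) else d) d1,
       arcs.foldl (fun d a => if ¬ (a.1 ∈ places ∧ a.2 ∈ transitions) ∧ (a.1 ∈ transitions ∧ a.2 ∈ places) then d.modify a.1 [] (· ++ [a.2]) else d) d2) := by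
  induction arcs generalizing d1 d2 with
  | nil => rfl
  | cons a l ih =>
    simp only [List.foldl_cons]
    rw [ih]
    congr 1 <;>
      (by_cases h1 : a.1 ∈ places ∧ a.2 ∈ transitions <;>
       by_cases h2 : a.1 ∈ transitions ∧ a.2 ∈ places <;> simp [h1, h2])

-- getD after a conditional modify fold, as a filtered projection of the arcs.
theorem getD_cond_modify (c : String × String → Prop) [DecidablePred c]
    (key val : String × String → String)
    (arcs : List (String × String)) (d : PySem.Dict String (List String)) (t : String) :
    (arcs.foldl (fun d a => if c a then d.modify (key a) [] (· ++ [val a]) else d) d).getD t []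
      = d.getD t [] ++ ((arcs.filter (fun a => decide (c a) && (key a == t))).map val) := by
  induction arcs generalizing d with
  | nil => simp
  | cons a l ih =>
    simp only [List.foldl_cons, List.filter_cons, ih]
    by_cases hc : c a
    · by_cases hk : key a = t
      · simp [hc, hk]
      · have hk' : ¬ t = key a := fun h => hk h.symm
        simp [hc, hk, hk', PySem.Dict.getD_modify]
    · simp [hc]

-- keys are unchanged by the conditional modify fold when every modified key is already present.
theorem keys_cond_modify (c : String × String → Prop) [DecidablePred c]
    (key val : String × String → String)
    (arcs : List (String × String)) (d : PySem.Dict String (List String))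
    (h : ∀ a ∈ arcs, c a → key a ∈ d.keys) :
    (arcs.foldl (fun d a => if c a then d.modify (key a) [] (· ++ [val a]) else d) d).keys = d.keys := by
  rw [PySem.List.foldl_ite_eq_foldl_filter c
        (fun (d : PySem.Dict String (List String)) a => d.modify (key a) [] (· ++ [val a])) arcs d,
      PySem.Dict.keys_foldl_modify_key _ key [] (fun _ a x => x ++ [val a]),
      PySem.Set.update_eq_append_filter]
  have hnil : List.filter (fun y => !PySem.Set.contains d.keys y)
      (PySem.Set.ofList (List.map key (List.filter (fun x => decide (c x)) arcs))) = [] := by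
    rw [List.filter_eq_nil_iff]
    intro y hy
    simp only [PySem.Set.mem_ofList, List.mem_map, List.mem_filter] at hy
    obtain ⟨a, ⟨ha, hca⟩, rfl⟩ := hy
    have := h a ha (of_decide_eq_true hca)
    simp [this]
  rw [hnil, List.append_nil]

theorem nodup_keys_cond_modify (c : String × String → Prop) [DecidablePred c]
    (key val : String × String → String)
    (arcs : List (String × String)) (d : PySem.Dict String (List String))
    (h : d.keys.Nodup) :
    (arcs.foldl (fun d a => if c a then d.modify (key a) [] (· ++ [val a]) else d) d).keys.Nodup := by
  rw [PySem.List.foldl_ite_eq_foldl_filter c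
        (fun (d : PySem.Dict String (List String)) a => d.modify (key a) [] (· ++ [val a])) arcs d]
  exact PySem.Dict.nodup_keys_foldl_modify_key _ key [] (fun _ a x => x ++ [val a]) d h

-- the initial dict of A: keys and values
theorem keys_init (transitions : List String) :
    (transitions.foldl (fun d t => d.insert t ([] : List String)) PySem.Dict.empty).keys
      = PySem.Set.ofList transitions := by
  rw [PySem.Dict.keys_foldl_insert transitions (fun _ _ => []), PySem.Dict.keys_empty,
      PySem.Set.update_nil_left]

theorem getD_init (transitions : List String) (k : String) :
    (transitions.foldl (fun d t => d.insert t ([] : List String)) PySem.Dict.empty).getD k [] = [] := by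
  rw [getD_foldl_insert_fun transitions (fun _ => [])]
  split <;> simp

-- The pre component of A equals B's comprehension items.
theorem pre_side (places transitions : List String) (arcs : List (String × String)) :
    (arcs.foldl (fun d a => if a.1 ∈ places ∧ a.2 ∈ transitions then d.modify a.2 [] (· ++ [a.1]) else d)
        (transitions.foldl (fun d t => d.insert t ([] : List String)) PySem.Dict.empty)).items
      = (PySem.Set.ofList transitions).map (fun t => (t, pvPreList places arcs t)) := by
  set c : String × String → Prop := fun a => a.1 ∈ places ∧ a.2 ∈ transitions with hc
  set d0 := transitions.foldl (fun d t => d.insert t ([] : List String)) PySem.Dict.empty with hd0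
  have hmem : ∀ a ∈ arcs, c a → a.2 ∈ d0.keys := by
    intro a _ hca
    rw [hd0, keys_init, PySem.Set.mem_ofList]
    exact hca.2
  have hnd0 : d0.keys.Nodup := by rw [hd0, keys_init]; exact PySem.Set.nodup_ofList transitions
  have hk := keys_cond_modify c (fun a => a.2) (fun a => a.1) arcs d0 hmem
  have hnd := nodup_keys_cond_modify c (fun a => a.2) (fun a => a.1) arcs d0 hnd0
  rw [PySem.Dict.items_eq_map_keys _ hnd [], hk, hd0, keys_init]
  refine List.map_congr_left (fun t ht => ?_)
  have ht' : t ∈ transitions := (PySem.Set.mem_ofList transitions t).mp ht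
  rw [getD_cond_modify c (fun a => a.2) (fun a => a.1), getD_init, List.nil_append]
  simp only [Prod.mk.injEq, true_and, pvPreList]
  congr 1
  refine List.filter_congr (fun a _ => ?_)
  by_cases h2 : a.2 = t
  · simp [hc, h2, ht']
  · have h2' : ¬ (a.2 == t) = true := by simpa using h2
    simp [h2']

-- The post component of A equals B's comprehension items, given Pre_ (no arc triggers both branches).
theorem post_side (places transitions : List String) (arcs : List (String × String))
    (hpre : Pre_Transition_Input_Output places transitions arcs) :
    (arcs.foldl (fun d a => if ¬ (a.1 ∈ places ∧ a.2 ∈ transitions) ∧ (a.1 ∈ transitions ∧ a.2 ∈ places) then d.modify a.1 [] (· ++ [a.2]) else d)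
        (transitions.foldl (fun d t => d.insert t ([] : List String)) PySem.Dict.empty)).items
      = (PySem.Set.ofList transitions).map (fun t => (t, pvPostList places arcs t)) := by
  set c : String × String → Prop := fun a => ¬ (a.1 ∈ places ∧ a.2 ∈ transitions) ∧ (a.1 ∈ transitions ∧ a.2 ∈ places) with hc
  set d0 := transitions.foldl (fun d t => d.insert t ([] : List String)) PySem.Dict.empty with hd0
  have hmem : ∀ a ∈ arcs, c a → a.1 ∈ d0.keys := by
    intro a _ hca
    rw [hd0, keys_init, PySem.Set.mem_ofList]
    exact hca.2.1
  have hnd0 : d0.keys.Nodup := by rw [hd0, keys_init]; exact PySem.Set.nodup_ofList transitions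
  have hk := keys_cond_modify c (fun a => a.1) (fun a => a.2) arcs d0 hmem
  have hnd := nodup_keys_cond_modify c (fun a => a.1) (fun a => a.2) arcs d0 hnd0
  rw [PySem.Dict.items_eq_map_keys _ hnd [], hk, hd0, keys_init]
  refine List.map_congr_left (fun t ht => ?_)
  have ht' : t ∈ transitions := (PySem.Set.mem_ofList transitions t).mp ht
  rw [getD_cond_modify c (fun a => a.1) (fun a => a.2), getD_init, List.nil_append]
  simp only [Prod.mk.injEq, true_and, pvPostList]
  congr 1
  refine List.filter_congr (fun a ha => ?_)
  by_cases h1 : a.1 = t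
  · have hnboth := hpre a ha
    by_cases hp : a.2 ∈ places
    · have hnpre : ¬ (a.1 ∈ places ∧ a.2 ∈ transitions) := by
        intro hab
        exact hnboth ⟨hab.1, hab.2, h1 ▸ ht', hp⟩
      have : t ∉ places ∨ a.2 ∉ transitions := by
        by_cases hq : t ∈ places
        · exact Or.inr (fun hr => hnpre ⟨h1 ▸ hq, hr⟩)
        · exact Or.inl hq
      simp [hc, h1, ht', hp]
      exact this
    · simp [hc, h1, hp]
  · have h1' : ¬ (a.1 == t) = true := by simpa using h1
    simp [h1']

-- ===== VERDICT (by name: the statement is the Claim_ definition above) =====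
theorem Transition_Input_Output_spec : Claim_equal_Transition_Input_Output := by
  intro places transitions arcs _ hpre
  show Transition_Input_Output places transitions arcs = Transition_Input_Output_alt places transitions arcs
  unfold Transition_Input_Output Transition_Input_Output_alt
  simp only [pair_fold_split]
  rw [pre_side, post_side places transitions arcs hpre,
      items_foldl_insert_fun transitions (pvPreList places arcs),
      items_foldl_insert_fun transitions (pvPostList places arcs)]
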